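-- pv_equiv track=rewrite | github.com/rsarwas/aoc | 2018-12/answers.py | rule_from_string
-- ===== SOURCE A (Python) =====
-- def rule_from_string(str):
--     shift = 0
--     rule = 0
--     for char in str:
--         state = 1 if char == "#" else 0
--         rule += state<<shift
--         shift += 1
--     return rule
-- ===== SOURCE B (Python) =====
-- def rule_from_string(str):
--     bits = ''.join('1' if char == '#' else '0' for char in str)
--     return int(bits[::-1] or '0', 2)
-- ===== Notes on version B (the rewrite author's own statement) =====
-- stated objective: idiomatic
-- what changed: B builds a binary digit string (first char = LSB after reversal) and parses it with int(.,2), instead of accumulating with a running shift counter and per-bit addition.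
import Mathlib
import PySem

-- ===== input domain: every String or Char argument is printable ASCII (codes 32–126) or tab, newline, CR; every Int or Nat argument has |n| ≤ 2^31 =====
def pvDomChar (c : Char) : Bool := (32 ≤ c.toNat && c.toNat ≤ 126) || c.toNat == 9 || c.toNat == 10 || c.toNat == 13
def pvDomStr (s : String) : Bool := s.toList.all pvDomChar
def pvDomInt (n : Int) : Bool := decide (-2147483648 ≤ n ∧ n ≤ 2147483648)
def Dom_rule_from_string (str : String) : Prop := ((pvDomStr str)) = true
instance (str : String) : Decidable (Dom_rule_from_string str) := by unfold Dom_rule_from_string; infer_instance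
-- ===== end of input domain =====

-- B replaces A's shift-accumulate loop by building a binary digit string (reversed) and parsing it base 2; idiomatic, same O(n) cost.


-- ===== PORT A =====
-- literal transliteration: fold over chars with state (shift, rule); state<<shift = state * 2^shift
def rule_from_string (str : String) : Int :=
  (str.toList.foldl
    (fun (p : Nat × Int) char =>
      let state : Int := if char = '#' then 1 else 0
      (p.1 + 1, p.2 + state * 2 ^ p.1))
    (0, 0)).2

-- ===== PORT B =====
-- literal transliteration of B: map chars to digits, reverse, parse base 2 (int(s,2) as a left fold acc*2+digit; empty string -> 0)
def parseBin (digits : List Int) : Int :=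
  digits.foldl (fun acc d => acc * 2 + d) 0

def rule_from_string_alt (str : String) : Int :=
  parseBin ((str.toList.map (fun char => if char = '#' then (1 : Int) else 0)).reverse)

-- ===== PRECONDITION & SPEC =====
def Spec_rule_from_string (str : String) (out : Int) : Prop := out = rule_from_string_alt str
instance (str : String) (out : Int) : Decidable (Spec_rule_from_string str out) := by unfold Spec_rule_from_string; infer_instance

-- ===== CLAIM (what is proved, stated in full; the proofs are below) =====
def Claim_equal_rule_from_string : Prop := ∀ (str : String), Dom_rule_from_string str → Spec_rule_from_string str (rule_from_string str)

-- ===== LEMMAS AND PROOFS =====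

-- the common value: first element is the least-significant bit
def bitsVal (l : List Int) : Int :=
  match l with
  | [] => 0
  | b :: t => b + 2 * bitsVal t

theorem parseBin_reverse (l : List Int) :
    parseBin l.reverse = bitsVal l := by
  induction l with
  | nil => rfl
  | cons b t ih =>
    simp only [parseBin, List.reverse_cons, List.foldl_append, List.foldl_cons, List.foldl_nil]
    simp only [parseBin] at ih
    rw [ih]
    simp only [bitsVal]
    ring

theorem foldA_val (l : List Char) (s : Nat) (r : Int) :
    (l.foldl
      (fun (p : Nat × Int) char =>
        let state : Int := if char = '#' then 1 else 0
        (p.1 + 1, p.2 + state * 2 ^ p.1))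
      (s, r)).2
    = r + 2 ^ s * bitsVal (l.map (fun char => if char = '#' then (1 : Int) else 0)) := by
  induction l generalizing s r with
  | nil => simp [bitsVal]
  | cons c t ih =>
    simp only [List.foldl_cons, List.map_cons, bitsVal]
    rw [ih]
    ring

-- ===== VERDICT (by name: the statement is the Claim_ definition above) =====
theorem rule_from_string_spec : Claim_equal_rule_from_string := by
  intro str _
  show rule_from_string str = rule_from_string_alt str
  unfold rule_from_string rule_from_string_alt
  rw [parseBin_reverse, foldA_val]
  ring
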